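-- pv_equiv track=rewrite | github.com/Z-zenos/Roominar | backend/api/v1/audience/services/events/listing_events_service.py | _build_recommendation_targets
-- ===== SOURCE A (Python) =====
-- from collections import defaultdict
--
-- def _build_recommendation_targets(targets_list: list):
--     """
--     Create targets set from application, bookmark and user targets
--     """
--     targets = defaultdict(lambda: {"values": [], "points": []})
--     for item in targets_list:
--         for key, value in item.items():
--             if value is not None:
--                 for v in value:
--                     if v in targets[key]["values"]:
--                         index = targets[key]["values"].index(v)
--                         targets[key]["points"][index] += 1
--                     else:
--                         targets[key]["values"].append(v)
--                         targets[key]["points"].append(1)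
--     return dict(targets)
-- ===== SOURCE B (Python) =====
-- from collections import Counter
--
-- def _build_recommendation_targets(targets_list: list):
--     """
--     Create targets set from application, bookmark and user targets
--     """
--     # Pass 1: flatten everything into one stream of (key, v) pairs.
--     pairs = [
--         (key, v)
--         for item in targets_list
--         for key, value in item.items()
--         if value is not None
--         for v in value
--     ]
--     # Pass 2: count the pairs in one go (first-seen order is preserved).
--     counts = Counter(pairs)
--     # Pass 3: regroup the counted pairs by key.
--     result = {}
--     for (key, v), n in counts.items():
--         entry = result.setdefault(key, {"values": [], "points": []})
--         entry["values"].append(v)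
--         entry["points"].append(n)
--     return result
-- ===== Notes on version B (the rewrite author's own statement) =====
-- stated objective: alternative
-- what changed: Instead of A's single nested pass that grows per-key parallel values/points lists with an inner list-membership + .index scan, B runs three staged passes: flatten the input to one stream of (key, value) pairs, count the pairs with one Counter (hash counting, first-seen order), then regroup the counted pairs by key into the values/points lists.
import Mathlib
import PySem

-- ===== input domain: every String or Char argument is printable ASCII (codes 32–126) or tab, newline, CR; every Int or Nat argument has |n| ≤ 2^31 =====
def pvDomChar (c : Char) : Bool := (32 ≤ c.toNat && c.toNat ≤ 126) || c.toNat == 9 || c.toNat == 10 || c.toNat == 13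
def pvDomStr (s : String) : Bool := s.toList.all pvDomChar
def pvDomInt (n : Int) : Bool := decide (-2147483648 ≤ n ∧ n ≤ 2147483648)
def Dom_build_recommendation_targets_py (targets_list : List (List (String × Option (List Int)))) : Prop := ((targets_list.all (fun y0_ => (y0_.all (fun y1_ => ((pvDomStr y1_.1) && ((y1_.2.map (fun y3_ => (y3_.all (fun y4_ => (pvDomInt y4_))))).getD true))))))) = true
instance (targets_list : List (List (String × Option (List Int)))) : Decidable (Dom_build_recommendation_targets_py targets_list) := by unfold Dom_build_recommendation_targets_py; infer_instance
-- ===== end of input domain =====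

-- B replaces A's single nested pass (per-key parallel lists grown with an inner membership/.index
-- scan) by three staged passes: flatten to a (key, value)-pair stream, count pairs with one
-- Counter, regroup the counted pairs by key (objective: alternative decomposition).


-- ===== PORT A =====
-- The inner dict literally has exactly the keys "values"/"points"; it is carried as the pair
-- (values, points) and rendered as the two-entry association list on return.
-- `points[index] += 1` is `set index (getD index 0 + 1)`; `index` comes from `.index` on the
-- parallel `values` list so it is always in range and the 0 default is never used.
def pyEntryUpd (e : List Int × List Int) (v : Int) : List Int × List Int :=
  match PySem.List.index? e.1 v with
  | some i => (e.1, e.2.set i (e.2.getD i 0 + 1))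
  | none => (e.1 ++ [v], e.2 ++ [1])

-- one iteration of A's `for v in value` body (defaultdict materialises the entry, both branches
-- leave the updated entry stored under `key`)
def pyAStep (targets : PySem.Dict String (List Int × List Int)) (key : String) (v : Int) :
    PySem.Dict String (List Int × List Int) :=
  targets.insert key (pyEntryUpd (targets.getD key ([], [])) v)

def build_recommendation_targets_py (targets_list : List (List (String × Option (List Int)))) :
    List (String × List (String × List Int)) :=
  (targets_list.foldl (fun targets item =>
      item.foldl (fun targets kv =>
        match kv.2 with
        | some value => value.foldl (fun t v => pyAStep t kv.1 v) targets
        | none => targets) targets)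
    PySem.Dict.empty).items.map (fun p => (p.1, [("values", p.2.1), ("points", p.2.2)]))

-- ===== PORT B =====
-- pass 1: the flattening comprehension
def pvPairs (targets_list : List (List (String × Option (List Int)))) : List (String × Int) :=
  targets_list.flatMap (fun item => item.flatMap (fun kv =>
    match kv.2 with
    | some value => value.map (fun v => (kv.1, v))
    | none => []))

-- pass 3 body: `result.setdefault(key, …)` then in-place append on the stored entry
-- = fetch-with-default, append, store back
def pvGroupStep (r : PySem.Dict String (List Int × List Int)) (pn : (String × Int) × Int) :
    PySem.Dict String (List Int × List Int) :=
  let e := r.getD pn.1.1 ([], [])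
  r.insert pn.1.1 (e.1 ++ [pn.1.2], e.2 ++ [pn.2])

def build_recommendation_targets_py_alt (targets_list : List (List (String × Option (List Int)))) :
    List (String × List (String × List Int)) :=
  let counts := PySem.Dict.counter (pvPairs targets_list)   -- pass 2: Counter(pairs)
  let result := counts.items.foldl pvGroupStep PySem.Dict.empty
  result.items.map (fun p => (p.1, [("values", p.2.1), ("points", p.2.2)]))

-- ===== PRECONDITION & SPEC =====
def Spec_build_recommendation_targets_py (targets_list : List (List (String × Option (List Int)))) (out : List (String × List (String × List Int))) : Prop := out = build_recommendation_targets_py_alt targets_list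
instance (targets_list : List (List (String × Option (List Int)))) (out : List (String × List (String × List Int))) : Decidable (Spec_build_recommendation_targets_py targets_list out) := by unfold Spec_build_recommendation_targets_py; infer_instance

-- ===== CLAIM (what is proved, stated in full; the proofs are below) =====
def Claim_equal_build_recommendation_targets_py : Prop := ∀ (targets_list : List (List (String × Option (List Int)))), Dom_build_recommendation_targets_py targets_list → Spec_build_recommendation_targets_py targets_list (build_recommendation_targets_py targets_list)

-- ===== LEMMAS AND PROOFS =====

-- values appearing under key s in a counted-pair list, and their counts, in order
def pvVals (s : String) (cl : List ((String × Int) × Int)) : List Int :=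
  cl.filterMap (fun q => if q.1.1 = s then some q.1.2 else none)

def pvPts (s : String) (cl : List ((String × Int) × Int)) : List Int :=
  cl.filterMap (fun q => if q.1.1 = s then some q.2 else none)

-- pass-3 grouping fold as a function of the counted-pair list
def pvG (cl : List ((String × Int) × Int)) : PySem.Dict String (List Int × List Int) :=
  cl.foldl pvGroupStep PySem.Dict.empty

-- the values stored under key k among a list of (key, value) pairs, in order
def pvValsK (k : String) (K : List (String × Int)) : List Int :=
  K.filterMap (fun q => if q.1 = k then some q.2 else none)

theorem pvVals_append (s : String) (cl : List ((String × Int) × Int)) (x : (String × Int) × Int) :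
    pvVals s (cl ++ [x]) = pvVals s cl ++ (if x.1.1 = s then [x.1.2] else []) := by
  simp only [pvVals, List.filterMap_append, List.filterMap_cons, List.filterMap_nil]
  split_ifs <;> rfl

theorem pvPts_append (s : String) (cl : List ((String × Int) × Int)) (x : (String × Int) × Int) :
    pvPts s (cl ++ [x]) = pvPts s cl ++ (if x.1.1 = s then [x.2] else []) := by
  simp only [pvPts, List.filterMap_append, List.filterMap_cons, List.filterMap_nil]
  split_ifs <;> rfl

theorem pvVals_of_not_mem (s : String) (cl : List ((String × Int) × Int))
    (h : s ∉ cl.map (·.1.1)) : pvVals s cl = [] := by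
  rw [pvVals, List.filterMap_eq_nil_iff]
  intro q hq
  have : q.1.1 ≠ s := fun he => h (he ▸ List.mem_map_of_mem hq)
  simp [this]

theorem pvPts_of_not_mem (s : String) (cl : List ((String × Int) × Int))
    (h : s ∉ cl.map (·.1.1)) : pvPts s cl = [] := by
  rw [pvPts, List.filterMap_eq_nil_iff]
  intro q hq
  have : q.1.1 ≠ s := fun he => h (he ▸ List.mem_map_of_mem hq)
  simp [this]

theorem pvG_eq (cl : List ((String × Int) × Int)) :
    pvG cl = PySem.Dict.mk ((PySem.Set.ofList (cl.map (·.1.1))).map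
      (fun s => (s, (pvVals s cl, pvPts s cl)))) := by
  induction cl using List.reverseRecOn with
  | nil => rfl
  | append_singleton cl x ih =>
    obtain ⟨⟨k, v⟩, n⟩ := x
    have hK' : PySem.Set.ofList ((cl ++ [((k, v), n)]).map (·.1.1))
        = PySem.Set.add (PySem.Set.ofList (cl.map (·.1.1))) k := by
      rw [List.map_append, PySem.Set.ofList, List.foldl_append, ← PySem.Set.ofList]
      rfl
    have hKnd : (PySem.Set.ofList (cl.map (·.1.1))).Nodup := PySem.Set.nodup_ofList _
    have hkeys : (PySem.Dict.mk ((PySem.Set.ofList (cl.map (·.1.1))).map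
        (fun s => (s, (pvVals s cl, pvPts s cl))))).keys = PySem.Set.ofList (cl.map (·.1.1)) := by
      rw [PySem.Dict.keys_mk, List.map_map]
      exact List.map_id _
    rw [pvG, List.foldl_concat, ← pvG, ih, pvGroupStep, hK']
    by_cases hmem : k ∈ PySem.Set.ofList (cl.map (·.1.1))
    · have hgd : (PySem.Dict.mk ((PySem.Set.ofList (cl.map (·.1.1))).map
          (fun s => (s, (pvVals s cl, pvPts s cl))))).getD k ([], []) = (pvVals k cl, pvPts k cl) :=
        PySem.Dict.getD_of_mem_items _ (List.mem_map_of_mem (f := fun s => (s, (pvVals s cl, pvPts s cl))) hmem) (by rw [hkeys]; exact hKnd) _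
      have hcon : (PySem.Dict.mk ((PySem.Set.ofList (cl.map (·.1.1))).map
          (fun s => (s, (pvVals s cl, pvPts s cl))))).contains k = true := by
        rw [PySem.Dict.contains_iff_mem_keys, hkeys]; exact hmem
      have hadd : PySem.Set.add (PySem.Set.ofList (cl.map (·.1.1))) k
          = PySem.Set.ofList (cl.map (·.1.1)) := by
        rw [PySem.Set.add, if_pos ((PySem.Set.contains_iff _ _).mpr hmem)]
      rw [hadd]
      apply PySem.Dict.ext
      simp only [hgd]
      rw [PySem.Dict.items_insert, if_pos hcon, List.map_map]
      refine List.map_congr_left (fun s hs => ?_)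
      by_cases hsk : s = k
      · subst hsk
        simp [pvVals_append, pvPts_append]
      · have h1 : ¬ ((s == k) = true) := by simpa using hsk
        have h2 : ¬ (k = s) := fun he => hsk he.symm
        simp [Function.comp, h1, h2, pvVals_append, pvPts_append]
    · have hcon : (PySem.Dict.mk ((PySem.Set.ofList (cl.map (·.1.1))).map
          (fun s => (s, (pvVals s cl, pvPts s cl))))).contains k = false := by
        rw [← Bool.not_eq_true, PySem.Dict.contains_iff_mem_keys, hkeys]; exact hmem
      have hgd : (PySem.Dict.mk ((PySem.Set.ofList (cl.map (·.1.1))).map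
          (fun s => (s, (pvVals s cl, pvPts s cl))))).getD k ([], []) = ([], []) :=
        PySem.Dict.getD_of_not_contains _ _ hcon
      have hadd : PySem.Set.add (PySem.Set.ofList (cl.map (·.1.1))) k
          = PySem.Set.ofList (cl.map (·.1.1)) ++ [k] := by
        rw [PySem.Set.add, if_neg]
        intro hc
        exact hmem ((PySem.Set.contains_iff _ _).mp hc)
      have hnotin : k ∉ cl.map (·.1.1) := fun h => hmem ((PySem.Set.mem_ofList _ _).mpr h)
      rw [hadd]
      apply PySem.Dict.ext
      simp only [hgd]
      rw [PySem.Dict.items_insert, if_neg (by rw [hcon]; exact Bool.false_ne_true),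
        List.map_append]
      congr 1
      · refine List.map_congr_left (fun s hs => ?_)
        have hsk : ¬ (k = s) := fun he => hmem (he ▸ hs)
        simp [pvVals_append, pvPts_append, hsk]
      · simp [pvVals_append, pvPts_append, pvVals_of_not_mem _ _ hnotin, pvPts_of_not_mem _ _ hnotin]

theorem pv_mem_valsK (k : String) (v : Int) (K : List (String × Int)) :
    v ∈ pvValsK k K ↔ (k, v) ∈ K := by
  rw [pvValsK, List.mem_filterMap]
  constructor
  · rintro ⟨⟨a, b⟩, hq, he⟩
    by_cases h : a = k
    · have hbv : b = v := by simpa [h] using he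
      subst h; subst hbv; exact hq
    · simp [h] at he
  · intro h
    exact ⟨(k, v), h, by simp⟩

theorem pv_core (K : List (String × Int)) (k : String) (v : Int) (c : (String × Int) → Int)
    (hnd : K.Nodup) (hmem : (k, v) ∈ K) :
    pyEntryUpd (pvValsK k K, K.filterMap (fun q => if q.1 = k then some (c q) else none)) v
      = (pvValsK k K,
         K.filterMap (fun q => if q.1 = k then
           some (c q + if q.2 = v then 1 else 0) else none)) := by
  induction K with
  | nil => cases hmem
  | cons q K ih =>
    rw [List.nodup_cons] at hnd
    obtain ⟨a, b⟩ := q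
    by_cases hqk : a = k
    · subst hqk
      rw [pvValsK, List.filterMap_cons_some (by simp : _ = some b),
        List.filterMap_cons_some (by simp : _ = some (c (a, b))),
        List.filterMap_cons_some (by simp : _ = some (c (a, b) + if (a, b).2 = v then 1 else 0)),
        ← pvValsK]
      by_cases hqv : b = v
      · subst hqv
        have hidx : PySem.List.index? (b :: pvValsK a K) b = some 0 := by
          simp [PySem.List.index?, List.idxOf?_cons]
        rw [pyEntryUpd, hidx]
        simp only [List.set_cons_zero, List.getD_cons_zero, if_true]
        refine congrArg (fun l => (b :: pvValsK a K, (c (a, b) + 1) :: l)) ?_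
        refine List.filterMap_congr (fun q' hq' => ?_)
        obtain ⟨a', b'⟩ := q'
        by_cases h' : a' = a
        · have hb : b' ≠ b := fun he => hnd.1 (by rw [← h', ← he]; exact hq')
          simp [h', hb]
        · simp [h']
      · have hmem' : (a, v) ∈ K := by
          rcases List.mem_cons.mp hmem with h | h
          · exact absurd (congrArg Prod.snd h).symm hqv
          · exact h
        have ih' := ih hnd.2 hmem'
        obtain ⟨i, hi⟩ : ∃ i, List.idxOf? v (pvValsK a K) = some i :=
          Option.isSome_iff_exists.mp (by
            rw [Option.isSome_iff_ne_none]
            intro h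
            exact absurd (List.idxOf?_eq_none_iff.mp h)
              (by simp [(pv_mem_valsK a v K).mpr hmem']))
        have hidx' : PySem.List.index? (pvValsK a K) v = some i := hi
        rw [pyEntryUpd, hidx'] at ih'
        have hpts := congrArg Prod.snd ih'
        simp only at hpts
        have hbv : ¬ ((b == v) = true) := by simpa using hqv
        have hidx : PySem.List.index? (b :: pvValsK a K) v = some (i + 1) := by
          simp [PySem.List.index?, List.idxOf?_cons, hbv]
          exact hi
        rw [pyEntryUpd, hidx]
        simp only [List.set_cons_succ, List.getD_cons_succ, hqv, if_false, add_zero]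
        exact congrArg (fun l => (b :: pvValsK a K, c (a, b) :: l)) hpts
    · have hmem' : (k, v) ∈ K := by
        rcases List.mem_cons.mp hmem with h | h
        · exact absurd (congrArg Prod.fst h).symm hqk
        · exact h
      have ih' := ih hnd.2 hmem'
      rw [pvValsK, List.filterMap_cons_none (by simp [hqk] : _ = none),
        List.filterMap_cons_none (by simp [hqk] : _ = none),
        List.filterMap_cons_none (by simp [hqk] : _ = none), ← pvValsK]
      exact ih'

theorem pvSet_append {α : Type} [BEq α] (l : List α) (a : α) :
    PySem.Set.ofList (l ++ [a]) = PySem.Set.add (PySem.Set.ofList l) a := by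
  rw [PySem.Set.ofList, List.foldl_append, ← PySem.Set.ofList]
  rfl

theorem pvVals_map (s : String) (K : List (String × Int)) (c : (String × Int) → Int) :
    pvVals s (K.map (fun q => (q, c q))) = pvValsK s K := by
  rw [pvVals, List.filterMap_map]; rfl

theorem pvPts_map (s : String) (K : List (String × Int)) (c : (String × Int) → Int) :
    pvPts s (K.map (fun q => (q, c q))) =
      K.filterMap (fun q => if q.1 = s then some (c q) else none) := by
  rw [pvPts, List.filterMap_map]; rfl

theorem pvG_getD (cl : List ((String × Int) × Int)) (k : String) :
    (pvG cl).getD k ([], []) = (pvVals k cl, pvPts k cl) := by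
  rw [pvG_eq]
  by_cases hmem : k ∈ PySem.Set.ofList (cl.map (·.1.1))
  · exact PySem.Dict.getD_of_mem_items _
      (List.mem_map_of_mem (f := fun s => (s, (pvVals s cl, pvPts s cl))) hmem)
      (by rw [PySem.Dict.keys_mk, List.map_map]
          exact (List.map_id _) ▸ PySem.Set.nodup_ofList _) _
  · have hnotin : k ∉ cl.map (·.1.1) := fun h => hmem ((PySem.Set.mem_ofList _ _).mpr h)
    have h1 : pvVals k cl = [] := by
      rw [pvVals, List.filterMap_eq_nil_iff]
      intro q hq
      have : q.1.1 ≠ k := fun he => hnotin (he ▸ List.mem_map_of_mem hq)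
      simp [this]
    have h2 : pvPts k cl = [] := by
      rw [pvPts, List.filterMap_eq_nil_iff]
      intro q hq
      have : q.1.1 ≠ k := fun he => hnotin (he ▸ List.mem_map_of_mem hq)
      simp [this]
    rw [h1, h2]
    refine PySem.Dict.getD_of_not_contains _ _ ?_
    rw [← Bool.not_eq_true, PySem.Dict.contains_iff_mem_keys, PySem.Dict.keys_mk, List.map_map]
    rw [show ((fun x => x.1) ∘ fun s => (s, (pvVals s cl, pvPts s cl))) = id from rfl, List.map_id]
    exact hmem

theorem pvG_concat (cl : List ((String × Int) × Int)) (x : (String × Int) × Int) :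
    pvG (cl ++ [x]) = pvGroupStep (pvG cl) x := by
  rw [pvG, List.foldl_concat]; rfl

theorem pv_insert_char (cl : List ((String × Int) × Int)) (k : String)
    (E : List Int × List Int) (hk : k ∈ cl.map (·.1.1)) :
    (pvG cl).insert k E = PySem.Dict.mk ((PySem.Set.ofList (cl.map (·.1.1))).map
      (fun s => if s = k then (s, E) else (s, (pvVals s cl, pvPts s cl)))) := by
  rw [pvG_eq]
  have hkS : k ∈ PySem.Set.ofList (cl.map (·.1.1)) := (PySem.Set.mem_ofList _ _).mpr hk
  have hcon : (PySem.Dict.mk ((PySem.Set.ofList (cl.map (·.1.1))).map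
      (fun s => (s, (pvVals s cl, pvPts s cl))))).contains k = true := by
    rw [PySem.Dict.contains_iff_mem_keys, PySem.Dict.keys_mk, List.map_map]
    exact (List.map_id _) ▸ hkS
  apply PySem.Dict.ext
  rw [PySem.Dict.items_insert, if_pos hcon, List.map_map]
  refine List.map_congr_left (fun s hs => ?_)
  by_cases hsk : s = k
  · subst hsk
    simp
  · have hbne : ¬ ((s == k) = true) := by simpa using hsk
    simp [hsk]

theorem pv_commute (ps : List (String × Int)) (p : String × Int) :
    pyAStep (pvG (PySem.Dict.counter ps).items) p.1 p.2
      = pvG (PySem.Dict.counter (ps ++ [p])).items := by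
  obtain ⟨k, v⟩ := p
  dsimp only
  have hKnd : (PySem.Set.ofList ps).Nodup := PySem.Set.nodup_ofList ps
  rw [PySem.Dict.items_counter, PySem.Dict.items_counter]
  by_cases hp : (k, v) ∈ ps
  · -- existing pair: counts bumped in place
    have hK' : PySem.Set.ofList (ps ++ [(k, v)]) = PySem.Set.ofList ps := by
      rw [pvSet_append, PySem.Set.add,
        if_pos ((PySem.Set.contains_iff _ _).mpr ((PySem.Set.mem_ofList _ _).mpr hp))]
    rw [hK']
    rw [pyAStep, pvG_getD, pvVals_map, pvPts_map, pv_core _ _ _ _ hKnd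
      ((PySem.Set.mem_ofList _ _).mpr hp)]
    -- compare the two characterised dicts item by item
    have hkmem : k ∈ (((PySem.Set.ofList ps).map
        (fun q => (q, (List.count q ps : Int)))).map (·.1.1)) := by
      rw [List.map_map]
      exact List.mem_map_of_mem (f := fun q => q.1) ((PySem.Set.mem_ofList _ _).mpr hp)
    rw [pv_insert_char _ _ _ hkmem, pvG_eq]
    have hmapfst2 : ∀ c : (String × Int) → Int,
        ((PySem.Set.ofList ps).map (fun q => (q, c q))).map (·.1.1)
          = (PySem.Set.ofList ps).map (·.1) := by
      intro c; rw [List.map_map]; rfl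
    rw [hmapfst2, hmapfst2]
    refine congrArg PySem.Dict.mk ?_
    refine List.map_congr_left (fun s hs => ?_)
    by_cases hsk : s = k
    · subst hsk
      rw [if_pos rfl]
      refine congrArg (fun z => (s, z)) ?_
      rw [pvVals_map, pvPts_map]
      refine congrArg (fun z => (pvValsK s _, z)) ?_
      refine List.filterMap_congr (fun q hq => ?_)
      by_cases hq1 : q.1 = s
      · rw [if_pos hq1, if_pos hq1]
        refine congrArg some ?_
        rw [List.count_append, List.count_singleton]
        by_cases hq2 : q.2 = v
        · have hbq : (((s, v) == q) = true) := beq_iff_eq.mpr (Prod.ext hq1 hq2).symm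
          rw [if_pos hbq, if_pos hq2]
          push_cast; ring
        · have hne : ¬ (((s, v) == q) = true) := by
            simp only [beq_iff_eq]
            exact fun he => hq2 (by rw [← he])
          rw [if_neg hne, if_neg hq2, Nat.add_zero, add_zero]
      · rw [if_neg hq1, if_neg hq1]
    · rw [if_neg hsk]
      refine congrArg (fun z => (s, z)) ?_
      rw [pvVals_map, pvPts_map, pvVals_map, pvPts_map]
      refine congrArg (fun z => (pvValsK s _, z)) ?_
      refine List.filterMap_congr (fun q hq => ?_)
      by_cases hq1 : q.1 = s
      · rw [if_pos hq1, if_pos hq1]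
        refine congrArg some ?_
        rw [List.count_append, List.count_singleton]
        have hne : ¬ (((k, v) == q) = true) := by
          simp only [beq_iff_eq]
          intro he
          exact hsk (by rw [← he] at hq1; exact hq1.symm)
        rw [if_neg hne, Nat.add_zero]
      · rw [if_neg hq1, if_neg hq1]
  · -- fresh pair: appended with count 1
    have hq_ne : ∀ q ∈ PySem.Set.ofList ps, q ≠ (k, v) := by
      intro q hq he
      exact hp (he ▸ (PySem.Set.mem_ofList _ _).mp hq)
    have hcnt : ∀ q ∈ PySem.Set.ofList ps,
        (List.count q (ps ++ [(k, v)]) : Int) = (List.count q ps : Int) := by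
      intro q hq
      rw [List.count_append, List.count_singleton]
      have : ¬ (((k, v) == q) = true) := by
        simpa using fun he => (hq_ne q hq) he.symm
      rw [if_neg this, Nat.add_zero]
    have hK' : PySem.Set.ofList (ps ++ [(k, v)]) = PySem.Set.ofList ps ++ [(k, v)] := by
      rw [pvSet_append, PySem.Set.add, if_neg]
      intro hc
      exact hp ((PySem.Set.mem_ofList _ _).mp ((PySem.Set.contains_iff _ _).mp hc))
    have hcnt1 : (List.count (k, v) (ps ++ [(k, v)]) : Int) = 1 := by
      simp [List.count_append, List.count_eq_zero_of_not_mem hp]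
    have hmapeq : (PySem.Set.ofList ps).map
          (fun q => (q, (List.count q (ps ++ [(k, v)]) : Int)))
        = (PySem.Set.ofList ps).map (fun q => (q, (List.count q ps : Int))) :=
      List.map_congr_left (fun q hq => by rw [hcnt q hq])
    rw [hK', List.map_append, List.map_cons, List.map_nil, hmapeq, hcnt1, pvG_concat]
    simp only [pvGroupStep]
    rw [pyAStep, pvG_getD]
    have hvnot : PySem.List.index?
        (pvVals k ((PySem.Set.ofList ps).map (fun q => (q, (List.count q ps : Int))))) v = none := by
      rw [pvVals_map, PySem.List.index?, List.idxOf?_eq_none_iff]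
      intro hmem
      exact hp ((PySem.Set.mem_ofList _ _).mp ((pv_mem_valsK k v _).mp hmem))
    rw [pyEntryUpd, hvnot]

-- A's fold over the pair stream = B's counter + grouping
theorem pv_main (ps : List (String × Int)) :
    ps.foldl (fun t p => pyAStep t p.1 p.2) PySem.Dict.empty
      = pvG (PySem.Dict.counter ps).items := by
  induction ps using List.reverseRecOn with
  | nil => rfl
  | append_singleton ps p ih =>
    rw [List.foldl_concat, ih, pv_commute]

-- A's nested loops traverse exactly the flattened pair stream
theorem pv_flatten (tl : List (List (String × Option (List Int)))) :
    tl.foldl (fun targets item =>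
      item.foldl (fun targets kv =>
        match kv.2 with
        | some value => value.foldl (fun t v => pyAStep t kv.1 v) targets
        | none => targets) targets) PySem.Dict.empty
      = (pvPairs tl).foldl (fun t p => pyAStep t p.1 p.2) PySem.Dict.empty := by
  rw [pvPairs, List.foldl_flatMap]
  refine PySem.List.foldl_congr_mem _ _ _ _ (fun t item _ => ?_)
  rw [List.foldl_flatMap]
  refine PySem.List.foldl_congr_mem _ _ _ _ (fun t kv _ => ?_)
  match kv with
  | (k, none) => rfl
  | (k, some value) => simp [List.foldl_map]

-- ===== VERDICT (by name: the statement is the Claim_ definition above) =====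
theorem build_recommendation_targets_py_spec : Claim_equal_build_recommendation_targets_py := by
  intro tl _
  unfold Spec_build_recommendation_targets_py
  unfold build_recommendation_targets_py build_recommendation_targets_py_alt
  rw [pv_flatten, pv_main]
  rfl
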